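-- pv_equiv track=rewrite | github.com/NickStafford2/WOWY_Advanced_Analytics | src/rawr_analytics/web/app.py | _build_csv_column_order
-- ===== SOURCE A (Python) =====
-- from typing import Any
--
-- def _build_csv_column_order(table_rows: list[dict[str, Any]]) -> list[str]:
--     preferred_order = [
--         "rank",
--         "player_id",
--         "player_name",
--         "span_average_value",
--         "average_minutes",
--         "total_minutes",
--         "games",
--         "games_with",
--         "games_without",
--         "avg_margin_with",
--         "avg_margin_without",
--         "season_count",
--         "points",
--     ]
--     available_columns = {key for row in table_rows for key in row}
--     ordered_columns = [column for column in preferred_order if column in available_columns]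
--     ordered_columns.extend(sorted(available_columns - set(ordered_columns)))
--     return ordered_columns
-- ===== SOURCE B (Python) =====
-- def _build_csv_column_order(table_rows):
--     preferred_order = [
--         "rank",
--         "player_id",
--         "player_name",
--         "span_average_value",
--         "average_minutes",
--         "total_minutes",
--         "games",
--         "games_with",
--         "games_without",
--         "avg_margin_with",
--         "avg_margin_without",
--         "season_count",
--         "points",
--     ]
--     index = {name: i for i, name in enumerate(preferred_order)}
--     sentinel = len(preferred_order)
--     available_columns = {key for row in table_rows for key in row}
--     return sorted(available_columns, key=lambda c: (index.get(c, sentinel), c))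
-- ===== Notes on version B (the rewrite author's own statement) =====
-- stated objective: simpler
-- what changed: Replaces A's filter-preferred pass plus set-difference plus separate alphabetical sort with a single composite-key sort of the available-column set, keyed by (rank-in-preferred-list via an index dict with a sentinel for unknown columns, column name).
import Mathlib
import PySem

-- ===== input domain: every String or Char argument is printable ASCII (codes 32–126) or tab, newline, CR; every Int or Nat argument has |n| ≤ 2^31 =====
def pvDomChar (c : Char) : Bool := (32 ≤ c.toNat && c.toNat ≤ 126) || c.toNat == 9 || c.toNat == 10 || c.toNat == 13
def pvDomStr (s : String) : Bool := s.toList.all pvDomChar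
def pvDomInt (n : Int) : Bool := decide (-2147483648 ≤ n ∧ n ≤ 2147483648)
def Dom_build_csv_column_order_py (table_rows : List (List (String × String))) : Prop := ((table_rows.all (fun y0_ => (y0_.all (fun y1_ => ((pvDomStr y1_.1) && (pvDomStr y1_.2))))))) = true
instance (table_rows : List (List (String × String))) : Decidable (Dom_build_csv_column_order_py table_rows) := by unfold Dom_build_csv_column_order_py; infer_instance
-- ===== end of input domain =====

-- B replaces A's filter + set-difference + separate alphabetical sort by ONE composite-key sort
-- of the available-column set, keyed by (index in the preferred list with sentinel 13, name) — simpler decomposition, same cost.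

-- the preferred_order literal both Pythons start from
def pvPref : List String :=
  ["rank", "player_id", "player_name", "span_average_value", "average_minutes",
   "total_minutes", "games", "games_with", "games_without", "avg_margin_with",
   "avg_margin_without", "season_count", "points"]

-- ===== PORT A =====
def build_csv_column_order_py (table_rows : List (List (String × String))) : List String :=
  let preferred_order := pvPref
  let available_columns : PySem.Set String :=
    PySem.Set.ofList (table_rows.flatMap (fun row => row.map Prod.fst))
  let ordered_columns := preferred_order.filter (fun c => PySem.Set.contains available_columns c)
  ordered_columns ++
    PySem.List.sorted (PySem.Set.diff available_columns (PySem.Set.ofList ordered_columns)) (fun x => x) false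

-- ===== PORT B =====
-- index = {name: i for i, name in enumerate(preferred_order)}
def pvIndexB : PySem.Dict String Int :=
  (PySem.List.enumerate pvPref 0).foldl (fun d p => d.insert p.2 (p.1 : Int)) PySem.Dict.empty

-- index.get(c, sentinel) with sentinel = len(preferred_order)
def pvRankB (c : String) : Int := pvIndexB.getD c (pvPref.length : Int)

def build_csv_column_order_py_alt (table_rows : List (List (String × String))) : List String :=
  let available_columns : PySem.Set String :=
    PySem.Set.ofList (table_rows.flatMap (fun row => row.map Prod.fst))
  PySem.List.sorted2 available_columns pvRankB (fun c => c) false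

-- ===== PRECONDITION & SPEC =====
def Spec_build_csv_column_order_py (table_rows : List (List (String × String))) (out : List String) : Prop := out = build_csv_column_order_py_alt table_rows
instance (table_rows : List (List (String × String))) (out : List String) : Decidable (Spec_build_csv_column_order_py table_rows out) := by unfold Spec_build_csv_column_order_py; infer_instance

-- ===== CLAIM (what is proved, stated in full; the proofs are below) =====
def Claim_equal_build_csv_column_order_py : Prop := ∀ (table_rows : List (List (String × String))), Dom_build_csv_column_order_py table_rows → Spec_build_csv_column_order_py table_rows (build_csv_column_order_py table_rows)

-- ===== LEMMAS AND PROOFS =====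

-- the composite key as a single linearly ordered key
def pvKey (c : String) : Lex (Int × String) := toLex (pvRankB c, c)

-- B's two-component sort is the sort by the lexicographic key pvKey
theorem pv_sorted2_eq_sorted_key (xs : List String) :
    PySem.List.sorted2 xs pvRankB (fun c => c) false = PySem.List.sorted xs pvKey false := by
  have hfun : (fun (a b : String) => decide (pvRankB a < pvRankB b) || (!decide (pvRankB b < pvRankB a) && decide (a < b)))
      = (fun (a b : String) => decide (pvKey a < pvKey b)) := by
    funext a b
    simp only [pvKey, Prod.Lex.toLex_lt_toLex]
    rcases lt_trichotomy (pvRankB a) (pvRankB b) with h | h | h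
    · simp [h]
    · simp [h]
    · simp [lt_asymm h, h, h.ne']
  rw [PySem.List.sorted_eq_foldl_insertBy]
  show List.foldl (fun acc x => PySem.List.insertBy (fun a b => decide (pvRankB a < pvRankB b) || (!decide (pvRankB b < pvRankB a) && decide (a < b))) x acc) [] xs = _
  rw [hfun]

theorem pv_pref_nodup : pvPref.Nodup := by decide

theorem pv_rank_pairwise : pvPref.Pairwise (fun a b => pvRankB a < pvRankB b) := by decide

theorem pv_rank_lt : ∀ c ∈ pvPref, pvRankB c < 13 := by
  have h : pvPref.all (fun c => decide (pvRankB c < 13)) = true := by decide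
  rw [List.all_eq_true] at h
  intro c hc
  exact of_decide_eq_true (h c hc)

theorem pv_keys_index : PySem.Dict.keys pvIndexB = pvPref := by decide

theorem pv_rank_sentinel {c : String} (h : c ∉ pvPref) : pvRankB c = 13 := by
  unfold pvRankB
  have hc : pvIndexB.contains c = false := by
    rw [PySem.Dict.contains_eq_decide_mem_keys, pv_keys_index]
    simpa using h
  simpa using PySem.Dict.getD_of_not_contains pvIndexB _ hc

theorem build_csv_column_order_py_spec' (table_rows : List (List (String × String))) :
    build_csv_column_order_py table_rows = build_csv_column_order_py_alt table_rows := by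
  unfold build_csv_column_order_py build_csv_column_order_py_alt
  set S : PySem.Set String :=
    PySem.Set.ofList (table_rows.flatMap (fun row => row.map Prod.fst)) with hS
  set L1 : List String := pvPref.filter (fun c => PySem.Set.contains S c) with hL1
  have hSnodup : S.Nodup := PySem.Set.nodup_ofList _
  have hL1nodup : L1.Nodup := List.Nodup.filter _ pv_pref_nodup
  have hofL1 : PySem.Set.ofList L1 = L1 := PySem.Set.ofList_eq_self_of_nodup _ hL1nodup
  have hmemL1 : ∀ c : String, c ∈ L1 ↔ c ∈ pvPref ∧ c ∈ S := by
    intro c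
    simp [hL1, List.mem_filter]
  set D : List String := PySem.Set.diff S (PySem.Set.ofList L1) with hD
  have hDnodup : D.Nodup := PySem.Set.nodup_diff _ _ hSnodup
  have hmemD : ∀ c : String, c ∈ D ↔ c ∈ S ∧ c ∉ L1 := by
    intro c; simp [hD, PySem.Set.mem_diff, hofL1]
  set SD : List String := PySem.List.sorted D (fun x => x) false with hSD
  have hSDperm : SD.Perm D := PySem.List.sorted_perm _ _ _
  have hmemSD : ∀ c : String, c ∈ SD ↔ c ∈ D := fun c => PySem.List.mem_sorted _ _ _ _
  have hSDnotpref : ∀ c ∈ SD, c ∉ pvPref := by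
    intro c hc hp
    have hd := (hmemSD c).mp hc
    have ⟨hcS, hcL1⟩ := (hmemD c).mp hd
    exact hcL1 ((hmemL1 c).mpr ⟨hp, hcS⟩)
  -- the concatenation is a permutation of S
  have hperm : (L1 ++ SD).Perm S := by
    rw [List.perm_ext_iff_of_nodup ?_ hSnodup]
    · intro c
      constructor
      · intro hc
        rcases List.mem_append.mp hc with h | h
        · exact ((hmemL1 c).mp h).2
        · exact ((hmemD c).mp ((hmemSD c).mp h)).1
      · intro hc
        by_cases hp : c ∈ pvPref
        · exact List.mem_append.mpr (Or.inl ((hmemL1 c).mpr ⟨hp, hc⟩))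
        · refine List.mem_append.mpr (Or.inr ((hmemSD c).mpr ((hmemD c).mpr ⟨hc, ?_⟩)))
          intro hl; exact hp ((hmemL1 c).mp hl).1
    · refine List.Nodup.append hL1nodup (hSDperm.symm.nodup hDnodup) ?_
      intro c hc1 hc2
      exact ((hmemD c).mp ((hmemSD c).mp hc2)).2 hc1
  -- the concatenation is strictly increasing under pvKey
  have hkey_lt : ∀ a b : String, (pvRankB a < pvRankB b ∨ (pvRankB a = pvRankB b ∧ a < b)) →
      pvKey a < pvKey b := by
    intro a b h
    exact (Prod.Lex.toLex_lt_toLex).mpr h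
  have hpair : (L1 ++ SD).Pairwise (fun a b => pvKey a < pvKey b) := by
    rw [List.pairwise_append]
    refine ⟨?_, ?_, ?_⟩
    · have hsubl : List.Sublist L1 pvPref := by rw [hL1]; exact List.filter_sublist
      exact (pv_rank_pairwise.sublist hsubl).imp (fun h => hkey_lt _ _ (Or.inl h))
    · have hlt : SD.Pairwise (fun a b : String => a < b) := by
        have hDset : D = PySem.Set.ofList D := (PySem.Set.ofList_eq_self_of_nodup _ hDnodup).symm
        rw [hSD, hDset]
        exact PySem.List.sorted_ofList_pairwise_lt D
      refine List.Pairwise.imp_of_mem ?_ hlt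
      intro a b ha hb h
      exact hkey_lt _ _ (Or.inr ⟨by
        rw [pv_rank_sentinel (hSDnotpref a ha), pv_rank_sentinel (hSDnotpref b hb)], h⟩)
    · intro a ha b hb
      refine hkey_lt _ _ (Or.inl ?_)
      rw [pv_rank_sentinel (hSDnotpref b hb)]
      exact pv_rank_lt a ((hmemL1 a).mp ha).1
  calc L1 ++ SD
      = PySem.List.sorted S pvKey false :=
        (PySem.List.sorted_eq_of_perm_of_pairwise_lt S (L1 ++ SD) pvKey hperm hpair).symm
    _ = PySem.List.sorted2 S pvRankB (fun c => c) false := (pv_sorted2_eq_sorted_key S).symm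

-- ===== VERDICT (by name: the statement is the Claim_ definition above) =====
theorem build_csv_column_order_py_spec : Claim_equal_build_csv_column_order_py := by
  intro table_rows _
  exact build_csv_column_order_py_spec' table_rows
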